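-- pv_equiv track=rewrite | github.com/pisilinux/uludag | tags/mudur/0.6/bin/update-modules.py | find_alias_name
-- ===== SOURCE A (Python) =====
-- def find_alias_name(name):
--     tmp = name.split("-")
--     if len(tmp) != 3 or (tmp[0] != "block" and tmp[0] != "char") or tmp[1] != "major":
--         return name
--     for x in tmp[2]:
--         if not x in "0123456789":
--             return name
--     return name + "-*"
-- ===== SOURCE B (Python) =====
-- def find_alias_name(name):
--     for prefix in ("block-major-", "char-major-"):
--         if name.startswith(prefix):
--             rest = name[len(prefix):]
--             if all(c in "0123456789" for c in rest):
--                 return name + "-*"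
--             return name
--     return name
-- ===== Notes on version B (the rewrite author's own statement) =====
-- stated objective: simpler
-- what changed: Instead of splitting the name on dashes into a list and checking the piece count, the first two pieces and a per-character digit loop, B matches the two fixed block/char major prefixes directly and checks that the remaining suffix is all ASCII digits.
import Mathlib
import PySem

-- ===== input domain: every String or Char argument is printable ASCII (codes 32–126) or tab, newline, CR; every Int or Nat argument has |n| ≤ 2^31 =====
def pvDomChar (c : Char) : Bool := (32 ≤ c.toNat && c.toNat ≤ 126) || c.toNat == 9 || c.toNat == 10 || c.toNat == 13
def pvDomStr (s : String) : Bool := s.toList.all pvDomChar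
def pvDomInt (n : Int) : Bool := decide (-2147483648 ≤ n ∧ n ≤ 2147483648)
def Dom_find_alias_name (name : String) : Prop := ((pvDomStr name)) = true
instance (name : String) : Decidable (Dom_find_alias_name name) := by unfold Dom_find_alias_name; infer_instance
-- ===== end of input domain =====

-- B replaces A's split-into-three-pieces check by direct matching of the two literal
-- prefixes followed by an all-digits check of the suffix (objective: simpler).

-- shared helper: Python's `x in "0123456789"` for a single character x
def pvIsDigitChar (x : Char) : Bool := PySem.Chars.isIn [x] "0123456789".toList

-- ===== PORT A =====
def find_alias_name (name : String) : String :=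
  let tmp := PySem.Chars.splitOn name.toList ['-']
  if tmp.length ≠ 3 ∨ (tmp.getD 0 [] ≠ "block".toList ∧ tmp.getD 0 [] ≠ "char".toList)
      ∨ tmp.getD 1 [] ≠ "major".toList then
    name
  else if (tmp.getD 2 []).all pvIsDigitChar then
    String.mk (name.toList ++ "-*".toList)
  else
    name

-- ===== PORT B =====
-- the for-loop over the tuple of the two prefixes
def pvAltGo (name : String) (prefixes : List String) : String :=
  match prefixes with
  | [] => name
  | p :: ps =>
    if PySem.Chars.startswith name.toList p.toList then
      -- rest = name[len(prefix):]
      if (PySem.List.slice name.toList (some (PySem.Chars.len p.toList)) none).all pvIsDigitChar then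
        String.mk (name.toList ++ "-*".toList)
      else
        name
    else pvAltGo name ps

def find_alias_name_alt (name : String) : String :=
  pvAltGo name ["block-major-", "char-major-"]

-- ===== PRECONDITION & SPEC =====
def Spec_find_alias_name (name : String) (out : String) : Prop := out = find_alias_name_alt name
instance (name : String) (out : String) : Decidable (Spec_find_alias_name name out) := by unfold Spec_find_alias_name; infer_instance

-- ===== CLAIM (what is proved, stated in full; the proofs are below) =====
def Claim_equal_find_alias_name : Prop := ∀ (name : String), Dom_find_alias_name name → Spec_find_alias_name name (find_alias_name name)

-- ===== LEMMAS AND PROOFS =====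

-- pure structural model of splitting on '-'
def mySplit : List Char → List (List Char)
  | [] => [[]]
  | c :: rest => if c = '-' then [] :: mySplit rest else (mySplit rest).modifyHead (c :: ·)

def myJoin : List (List Char) → List Char
  | [] => []
  | [x] => x
  | x :: xs => x ++ '-' :: myJoin xs

theorem mySplit_nil : mySplit [] = [[]] := rfl

theorem mySplit_cons (c : Char) (rest : List Char) :
    mySplit (c :: rest) = if c = '-' then [] :: mySplit rest
      else (mySplit rest).modifyHead (c :: ·) := rfl

theorem modifyHead_id {a : Type} (l : List a) : List.modifyHead (fun x => x) l = l := by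
  cases l <;> simp

theorem modifyHead_modifyHead {a : Type} (f g : a → a) (l : List a) :
    (l.modifyHead g).modifyHead f = l.modifyHead (fun x => f (g x)) := by
  cases l <;> simp

theorem go_eq (fuel : ℕ) : ∀ (l cur : List Char) (acc : List (List Char)), l.length ≤ fuel →
    PySem.Chars.splitOn.go ['-'] fuel l cur acc
      = acc.reverse ++ (mySplit l).modifyHead (cur.reverse ++ ·) := by
  induction fuel with
  | zero =>
    intro l cur acc h
    have hl : l = [] := List.length_eq_zero_iff.mp (Nat.le_zero.mp h)
    subst hl
    simp [PySem.Chars.splitOn.go, mySplit_nil]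
  | succ n ih =>
    intro l cur acc h
    cases l with
    | nil => simp [PySem.Chars.splitOn.go, mySplit_nil]
    | cons c rest =>
      simp only [PySem.Chars.splitOn.go]
      by_cases hc : c = '-'
      · subst hc
        have hpre : List.isPrefixOf ['-'] ('-' :: rest) = true := by
          simp [List.isPrefixOf]
        rw [if_pos hpre]
        rw [ih _ _ _ (by simpa using Nat.le_of_succ_le_succ h)]
        simp [mySplit_cons, modifyHead_id]
      · have hpre : List.isPrefixOf ['-'] (c :: rest) = false := by
          simp only [List.isPrefixOf, Bool.and_eq_false_iff]
          left
          exact beq_eq_false_iff_ne.mpr (fun h2 => hc h2.symm)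
        rw [if_neg (by simp [hpre])]
        rw [ih _ _ _ (by simpa using Nat.le_of_succ_le_succ h)]
        rw [mySplit_cons, if_neg hc, modifyHead_modifyHead]
        simp

theorem splitOn_eq_mySplit (s : List Char) :
    PySem.Chars.splitOn s ['-'] = mySplit s := by
  unfold PySem.Chars.splitOn
  rw [go_eq (s.length + 1) s [] [] (by omega)]
  simp [modifyHead_id]

theorem mySplit_ne_nil (l : List Char) : mySplit l ≠ [] := by
  induction l with
  | nil => simp [mySplit_nil]
  | cons c rest ih =>
    rw [mySplit_cons]
    split
    · simp
    · cases h : mySplit rest with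
      | nil => exact absurd h ih
      | cons x xs => simp [List.modifyHead]

theorem myJoin_mySplit (l : List Char) : myJoin (mySplit l) = l := by
  induction l with
  | nil => simp [mySplit_nil, myJoin]
  | cons c rest ih =>
    rw [mySplit_cons]
    by_cases hc : c = '-'
    · subst hc
      rw [if_pos rfl]
      cases h : mySplit rest with
      | nil => exact absurd h (mySplit_ne_nil rest)
      | cons x xs => rw [h] at ih; simp [myJoin, ih]
    · rw [if_neg hc]
      cases h : mySplit rest with
      | nil => exact absurd h (mySplit_ne_nil rest)
      | cons x xs =>
        rw [h] at ih
        cases xs <;> simp_all [myJoin, List.modifyHead]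

theorem no_dash_mySplit (l : List Char) (h : '-' ∉ l) : mySplit l = [l] := by
  induction l with
  | nil => simp [mySplit_nil]
  | cons c rest ih =>
    rw [mySplit_cons, if_neg (by intro hc; exact h (hc ▸ List.mem_cons_self))]
    rw [ih (fun hm => h (List.mem_cons_of_mem _ hm))]
    simp [List.modifyHead]

theorem mySplit_major (t : List Char) :
    mySplit ("major".toList ++ ('-' :: t)) = "major".toList :: mySplit t := by
  rw [show ("major".toList ++ ('-' :: t)) = 'm'::'a'::'j'::'o'::'r'::'-'::t by simp]
  rw [mySplit_cons, if_neg (by decide), mySplit_cons, if_neg (by decide),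
      mySplit_cons, if_neg (by decide), mySplit_cons, if_neg (by decide),
      mySplit_cons, if_neg (by decide), mySplit_cons, if_pos rfl]
  cases h : mySplit t with
  | nil => exact absurd h (mySplit_ne_nil t)
  | cons x xs => simp [List.modifyHead]

-- splitting a string that starts with "<word>-major-"
theorem mySplit_prefix (w t : List Char) (hw : '-' ∉ w) :
    mySplit (w ++ ('-' :: ("major".toList ++ ('-' :: t))))
      = w :: "major".toList :: mySplit t := by
  induction w with
  | nil =>
    simp only [List.nil_append]
    rw [mySplit_cons, if_pos rfl, mySplit_major]
  | cons c w ih =>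
    have hc : c ≠ '-' := fun hc => hw (hc ▸ List.mem_cons_self)
    have hw2 : '-' ∉ w := fun hm => hw (List.mem_cons_of_mem _ hm)
    rw [List.cons_append, mySplit_cons, if_neg hc, ih hw2]
    simp [List.modifyHead]

theorem digit_no_dash (l : List Char) (h : l.all pvIsDigitChar = true) : '-' ∉ l := by
  intro hm
  have h1 := List.all_eq_true.mp h _ hm
  have h2 : ['-'] <:+: "0123456789".toList :=
    (PySem.Chars.isIn_iff_infix _ _).mp h1
  have h3 : '-' ∈ "0123456789".toList := h2.subset List.mem_cons_self
  simp at h3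

theorem myJoin_three (a b u : List Char) : myJoin [a, b, u] = a ++ '-' :: (b ++ '-' :: u) := by
  simp [myJoin]

theorem all_digit_false_of_mySplit_long (t : List Char) (u v : List Char) (vs : List (List Char))
    (hm : mySplit t = u :: v :: vs) : t.all pvIsDigitChar = false := by
  cases h2 : t.all pvIsDigitChar with
  | false => rfl
  | true =>
    exfalso
    have h3 := no_dash_mySplit t (digit_no_dash t h2)
    rw [hm] at h3
    have h4 := congrArg List.length h3
    simp at h4

theorem mySplit_block (t : List Char) :
    mySplit ("block-major-".toList ++ t) = "block".toList :: "major".toList :: mySplit t := by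
  rw [show ("block-major-".toList ++ t) = "block".toList ++ ('-' :: ("major".toList ++ ('-' :: t))) by simp]
  exact mySplit_prefix _ t (by decide)

theorem mySplit_char (t : List Char) :
    mySplit ("char-major-".toList ++ t) = "char".toList :: "major".toList :: mySplit t := by
  rw [show ("char-major-".toList ++ t) = "char".toList ++ ('-' :: ("major".toList ++ ('-' :: t))) by simp]
  exact mySplit_prefix _ t (by decide)

theorem startswith_false_of_not_prefix (s p : List Char) (h : ¬ p <+: s) :
    PySem.Chars.startswith s p = false :=
  Bool.eq_false_iff.mpr (fun hx => h ((PySem.Chars.startswith_iff _ _).mp hx))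

theorem ports_eq (name : String) : find_alias_name name = find_alias_name_alt name := by
  unfold find_alias_name find_alias_name_alt pvAltGo
  simp only [splitOn_eq_mySplit, PySem.Chars.len_eq, PySem.List.slice_from_natCast]
  by_cases hb : "block-major-".toList <+: name.toList
  · rw [(PySem.Chars.startswith_iff _ _).mpr hb]
    obtain ⟨t, ht⟩ := hb
    rw [← ht, List.drop_left, mySplit_block]
    cases hm : mySplit t with
    | nil => exact absurd hm (mySplit_ne_nil t)
    | cons u us =>
      cases us with
      | nil =>
        have ht2 : t = u := by
          have hj := myJoin_mySplit t
          rw [hm] at hj; simpa [myJoin] using hj.symm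
        subst ht2
        simp [List.getD]
      | cons v vs =>
        have hdig := all_digit_false_of_mySplit_long t u v vs hm
        simp [hdig]
  · rw [startswith_false_of_not_prefix _ _ hb]
    simp only [Bool.false_eq_true, if_false, pvAltGo, PySem.Chars.len_eq,
      PySem.List.slice_from_natCast]
    by_cases hc : "char-major-".toList <+: name.toList
    · rw [(PySem.Chars.startswith_iff _ _).mpr hc]
      obtain ⟨t, ht⟩ := hc
      rw [← ht, List.drop_left, mySplit_char]
      cases hm : mySplit t with
      | nil => exact absurd hm (mySplit_ne_nil t)
      | cons u us =>
        cases us with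
        | nil =>
          have ht2 : t = u := by
            have hj := myJoin_mySplit t
            rw [hm] at hj; simpa [myJoin] using hj.symm
          subst ht2
          simp [List.getD]
        | cons v vs =>
          have hdig := all_digit_false_of_mySplit_long t u v vs hm
          simp [hdig]
    · rw [startswith_false_of_not_prefix _ _ hc]
      simp only [Bool.false_eq_true, if_false]
      split_ifs with h h2
      · rfl
      · exfalso
        rw [not_or, not_or] at h
        obtain ⟨h3, h4, h5⟩ := h
        rw [not_not] at h3 h5
        rw [not_and_or, not_not, not_not] at h4
        obtain ⟨a, b, u, habu⟩ := List.length_eq_three.mp h3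
        have hj := myJoin_mySplit name.toList
        rw [habu] at hj h4 h5
        simp [List.getD] at h4 h5
        rw [myJoin_three] at hj
        subst h5
        rcases h4 with h4 | h4 <;> subst h4
        · exact hb ⟨u, by simpa using hj⟩
        · exact hc ⟨u, by simpa using hj⟩
      · rfl

-- ===== VERDICT (by name: the statement is the Claim_ definition above) =====
theorem find_alias_name_spec : Claim_equal_find_alias_name := by
  intro name _
  unfold Spec_find_alias_name
  exact ports_eq name
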